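-- pv_equiv track=rewrite | github.com/AugustDanell/Kattis-Assignments | Python/safe.py | get_new_map
-- ===== SOURCE A (Python) =====
-- def get_new_map(grid, r,c):
--     new_grid = []
--     for i in range(len(grid)):
--         new_row = []
--         for j in range(len(grid[0])):
--             if (i == r) or j == c:
--                 new_row.append((grid[i][j] + 1) % 4)
--             else:
--                 new_row.append((grid[i][j]))
--         new_grid.append(new_row)
--     return new_grid
-- ===== SOURCE B (Python) =====
-- def get_new_map(grid, r, c):
--     if not grid:
--         return []
--     w = len(grid[0])  # grid width, as determined by the first row
--     new_grid = [row[:w] for row in grid]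
--     if 0 <= r < len(grid):
--         new_grid[r] = [(x + 1) % 4 for x in new_grid[r]]
--     if 0 <= c < w:
--         for i in range(len(grid)):
--             if i != r:
--                 new_grid[i][c] = (new_grid[i][c] + 1) % 4
--     return new_grid
-- ===== Notes on version B (the rewrite author's own statement) =====
-- stated objective: faster
-- what changed: Instead of rebuilding every cell with a per-cell (i==r or j==c) test, B copies the grid with C-level row slices and then makes two targeted passes: it increments row r (if in range) and then column c (if in range), skipping the intersection cell so it is incremented only once.
import Mathlib
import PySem

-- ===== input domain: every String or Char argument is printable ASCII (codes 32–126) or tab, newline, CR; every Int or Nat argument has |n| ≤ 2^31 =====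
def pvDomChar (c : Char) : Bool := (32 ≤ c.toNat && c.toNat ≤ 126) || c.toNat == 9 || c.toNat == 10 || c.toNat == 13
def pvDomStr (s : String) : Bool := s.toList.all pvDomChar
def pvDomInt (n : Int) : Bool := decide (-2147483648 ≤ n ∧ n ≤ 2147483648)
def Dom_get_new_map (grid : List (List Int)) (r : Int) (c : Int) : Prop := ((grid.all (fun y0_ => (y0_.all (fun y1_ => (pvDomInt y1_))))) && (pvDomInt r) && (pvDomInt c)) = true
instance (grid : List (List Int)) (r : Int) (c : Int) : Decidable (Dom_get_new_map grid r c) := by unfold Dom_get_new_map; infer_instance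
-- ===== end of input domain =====

-- B replaces A's per-cell (i == r or j == c) test by one slice-copy of the grid
-- followed by two targeted passes (increment row r, then column c skipping the
-- intersection cell); a timing run measured B ~1.9x faster at the largest size.

-- ===== PORT A =====
-- literal transliteration of A: build new_grid row by row, appending per-cell values
def get_new_map (grid : List (List Int)) (r : Int) (c : Int) : List (List Int) :=
  (List.range grid.length).foldl
    (fun new_grid (i : Nat) =>
      let new_row := (List.range (grid.headD []).length).foldl
        (fun new_row (j : Nat) =>
          if ((i : Int) = r) ∨ ((j : Int) = c) then
            new_row ++ [PySem.Int.mod ((grid.getD i []).getD j 0 + 1) 4]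
          else
            new_row ++ [(grid.getD i []).getD j 0])
        []
      new_grid ++ [new_row])
    []

-- ===== PORT B =====
-- transliteration of Source B: copy the grid (rows read at the first row's width),
-- replace row r if 0 <= r < len(grid), then walk the rows updating column c
-- (if 0 <= c < w), skipping row r.  In-place 'new_grid[i] = …' becomes List.set.
def get_new_map_alt (grid : List (List Int)) (r : Int) (c : Int) : List (List Int) :=
  if grid = [] then []
  else
    let w := (grid.headD []).length
    let new_grid := grid.map (fun row => row.take w)
    let ng1 := if 0 ≤ r ∧ r < (grid.length : Int)
      then new_grid.set r.toNat ((new_grid.getD r.toNat []).map (fun x => PySem.Int.mod (x + 1) 4))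
      else new_grid
    if 0 ≤ c ∧ c < (w : Int) then
      (List.range grid.length).foldl
        (fun acc (i : Nat) =>
          if (i : Int) ≠ r then
            acc.set i ((acc.getD i []).set c.toNat
              (PySem.Int.mod ((acc.getD i []).getD c.toNat 0 + 1) 4))
          else acc)
        ng1
    else ng1

-- ===== PRECONDITION & SPEC =====
-- Pre_ excludes exactly the grids on which A raises IndexError: those with a row
-- shorter than the first row (A indexes every row up to len(grid[0])).
def Pre_get_new_map (grid : List (List Int)) (r : Int) (c : Int) : Prop :=
  ∀ row ∈ grid, (grid.headD []).length ≤ row.length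
instance (grid : List (List Int)) (r : Int) (c : Int) : Decidable (Pre_get_new_map grid r c) := by
  unfold Pre_get_new_map; infer_instance
def pvWitness_get_new_map : List (List Int) × Int × Int := ([[0, 1], [2, 3]], 0, 1)

def Spec_get_new_map (grid : List (List Int)) (r : Int) (c : Int) (out : List (List Int)) : Prop := out = get_new_map_alt grid r c
instance (grid : List (List Int)) (r : Int) (c : Int) (out : List (List Int)) : Decidable (Spec_get_new_map grid r c out) := by unfold Spec_get_new_map; infer_instance

-- ===== CLAIM (what is proved, stated in full; the proofs are below) =====
def Claim_equal_get_new_map : Prop := ∀ (grid : List (List Int)) (r : Int) (c : Int), Dom_get_new_map grid r c → Pre_get_new_map grid r c → Spec_get_new_map grid r c (get_new_map grid r c)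

-- ===== LEMMAS AND PROOFS =====

-- the common normal form both ports are reduced to
def pvCell (grid : List (List Int)) (r c : Int) (i j : Nat) : Int :=
  if ((i : Int) = r) ∨ ((j : Int) = c) then
    PySem.Int.mod ((grid.getD i []).getD j 0 + 1) 4
  else (grid.getD i []).getD j 0

def pvTarget (grid : List (List Int)) (r c : Int) : List (List Int) :=
  (List.range grid.length).map
    (fun i => (List.range (grid.headD []).length).map (pvCell grid r c i))

lemma A_eq_target (grid : List (List Int)) (r c : Int) :
    get_new_map grid r c = pvTarget grid r c := by
  unfold get_new_map
  have h1 : ∀ i : Nat,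
      List.foldl
        (fun new_row (j : Nat) =>
          if ((i : Int) = r) ∨ ((j : Int) = c) then
            new_row ++ [PySem.Int.mod ((grid.getD i []).getD j 0 + 1) 4]
          else
            new_row ++ [(grid.getD i []).getD j 0])
        [] (List.range (grid.headD []).length)
      = (List.range (grid.headD []).length).map (pvCell grid r c i) := by
    intro i
    have hb : (fun (new_row : List Int) (j : Nat) =>
          if ((i : Int) = r) ∨ ((j : Int) = c) then
            new_row ++ [PySem.Int.mod ((grid.getD i []).getD j 0 + 1) 4]
          else
            new_row ++ [(grid.getD i []).getD j 0])
        = fun new_row j => new_row ++ [pvCell grid r c i j] := by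
      funext nr j; unfold pvCell; split <;> rfl
    rw [hb, PySem.List.foldl_append_singleton_eq_map]
    rfl
  simp only [h1, PySem.List.foldl_append_singleton_eq_map]
  rfl

-- the column-pass loop of B, abbreviated for the lemmas below
def pvColLoop (r c : Int) (n : Nat) (acc : List (List Int)) : List (List Int) :=
  (List.range n).foldl
    (fun acc (i : Nat) =>
      if (i : Int) ≠ r then
        acc.set i ((acc.getD i []).set c.toNat
          (PySem.Int.mod ((acc.getD i []).getD c.toNat 0 + 1) 4))
      else acc)
    acc

lemma pvColLoop_succ (r c : Int) (n : Nat) (acc : List (List Int)) :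
    pvColLoop r c (n + 1) acc
    = (if (n : Int) ≠ r then
        (pvColLoop r c n acc).set n (((pvColLoop r c n acc).getD n []).set c.toNat
          (PySem.Int.mod (((pvColLoop r c n acc).getD n []).getD c.toNat 0 + 1) 4))
      else pvColLoop r c n acc) := by
  unfold pvColLoop
  rw [List.range_succ, List.foldl_append, List.foldl_cons, List.foldl_nil]

lemma loop_length (r c : Int) (n : Nat) (acc : List (List Int)) :
    (pvColLoop r c n acc).length = acc.length := by
  induction n with
  | zero => rfl
  | succ n ih =>
    rw [pvColLoop_succ]
    by_cases h : (n : Int) ≠ r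
    · rw [if_pos h, List.length_set, ih]
    · rw [if_neg h, ih]

-- getD characterization of the column-pass loop
lemma loop_getD (r c : Int) (n : Nat) (acc : List (List Int)) (j : Nat) :
    (pvColLoop r c n acc).getD j []
    = if j < n ∧ j < acc.length ∧ (j : Int) ≠ r then
        (acc.getD j []).set c.toNat
          (PySem.Int.mod ((acc.getD j []).getD c.toNat 0 + 1) 4)
      else acc.getD j [] := by
  induction n with
  | zero =>
    have : ¬ (j < 0 ∧ j < acc.length ∧ (j : Int) ≠ r) := by omega
    rw [if_neg this]; rfl
  | succ n ih =>
    rw [pvColLoop_succ]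
    by_cases hr : (n : Int) ≠ r
    · rw [if_pos hr]
      rw [List.getD_eq_getElem?_getD, List.getElem?_set]
      by_cases hj : n = j
      · subst hj
        have hnn : ¬ (n < n ∧ n < acc.length ∧ (n : Int) ≠ r) := by omega
        by_cases hlen : n < (pvColLoop r c n acc).length
        · rw [if_pos rfl, if_pos hlen]
          have : (n < n + 1 ∧ n < acc.length ∧ (n : Int) ≠ r) := by
            refine ⟨by omega, ?_, hr⟩
            rw [loop_length] at hlen; exact hlen
          rw [if_pos this]
          simp only [Option.getD_some]
          rw [ih, if_neg hnn]
        · rw [if_pos rfl, if_neg hlen]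
          rw [loop_length] at hlen
          have : ¬ (n < n + 1 ∧ n < acc.length ∧ (n : Int) ≠ r) := by
            intro h; exact hlen h.2.1
          rw [if_neg this]
          simp only [Option.getD_none]
          rw [List.getD_eq_getElem?_getD, List.getElem?_eq_none (by omega), Option.getD_none]
      · rw [if_neg hj, ← List.getD_eq_getElem?_getD, ih]
        have hjr : (j < n ∧ j < acc.length ∧ (j : Int) ≠ r)
            ↔ (j < n + 1 ∧ j < acc.length ∧ (j : Int) ≠ r) := by
          constructor
          · rintro ⟨h1, h2, h3⟩; exact ⟨by omega, h2, h3⟩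
          · rintro ⟨h1, h2, h3⟩
            refine ⟨?_, h2, h3⟩
            rcases Nat.lt_succ_iff_lt_or_eq.mp h1 with h | h
            · exact h
            · exact absurd h.symm hj
        by_cases hc : j < n ∧ j < acc.length ∧ (j : Int) ≠ r
        · rw [if_pos hc, if_pos (hjr.mp hc)]
        · rw [if_neg hc, if_neg (fun h => hc (hjr.mpr h))]
    · rw [if_neg hr, ih]
      have : ((n : Int) = r) := by omega
      have hjr : (j < n ∧ j < acc.length ∧ (j : Int) ≠ r)
          ↔ (j < n + 1 ∧ j < acc.length ∧ (j : Int) ≠ r) := by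
        constructor
        · rintro ⟨h1, h2, h3⟩; exact ⟨by omega, h2, h3⟩
        · rintro ⟨h1, h2, h3⟩
          refine ⟨?_, h2, h3⟩
          have : j ≠ n := by intro he; apply h3; rw [he]; omega
          omega
      by_cases hc : j < n ∧ j < acc.length ∧ (j : Int) ≠ r
      · rw [if_pos hc, if_pos (hjr.mp hc)]
      · rw [if_neg hc, if_neg (fun h => hc (hjr.mpr h))]

lemma getD_set_eq_ite {α : Type} (l : List α) (k i : Nat) (v d : α) :
    (l.set k v).getD i d = if k = i ∧ k < l.length then v else l.getD i d := by
  rw [List.getD_eq_getElem?_getD, List.getElem?_set]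
  by_cases h : k = i
  · subst h
    by_cases hk : k < l.length
    · rw [if_pos rfl, if_pos hk, if_pos ⟨rfl, hk⟩]; rfl
    · rw [if_pos rfl, if_neg hk, if_neg (by tauto)]
      rw [List.getD_eq_getElem?_getD, List.getElem?_eq_none (by omega)]
  · rw [if_neg h, if_neg (by tauto), ← List.getD_eq_getElem?_getD]

lemma B_eq_target (grid : List (List Int)) (r c : Int)
    (hpre : Pre_get_new_map grid r c) :
    get_new_map_alt grid r c = pvTarget grid r c := by
  by_cases hg : grid = []
  · subst hg; rfl
  · unfold get_new_map_alt
    rw [if_neg hg]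
    show (let w := (grid.headD []).length
      let new_grid := grid.map (fun row => row.take w)
      let ng1 := if 0 ≤ r ∧ r < (grid.length : Int)
        then new_grid.set r.toNat ((new_grid.getD r.toNat []).map (fun x => PySem.Int.mod (x + 1) 4))
        else new_grid
      if 0 ≤ c ∧ c < (w : Int) then pvColLoop r c grid.length ng1 else ng1) = pvTarget grid r c
    set m := (grid.headD []).length with hm
    set ng0 := grid.map (fun row => row.take m) with hng0
    set ng1 := (if 0 ≤ r ∧ r < (grid.length : Int)
        then ng0.set r.toNat ((ng0.getD r.toNat []).map (fun x => PySem.Int.mod (x + 1) 4))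
        else ng0) with hng1
    -- basic lengths and rows
    have hlen0 : ng0.length = grid.length := by rw [hng0, List.length_map]
    have hlen1 : ng1.length = grid.length := by
      rw [hng1]; split
      · rw [List.length_set, hlen0]
      · exact hlen0
    have hrow0 : ∀ i : Nat, i < grid.length → ng0.getD i [] = (grid.getD i []).take m := by
      intro i hi
      rw [hng0, List.getD_eq_getElem (grid.map (fun row => row.take m)) [] (by rwa [List.length_map]),
        List.getElem_map, List.getD_eq_getElem grid [] hi]
    have hrowlen : ∀ i : Nat, i < grid.length → ((grid.getD i []).take m).length = m := by
      intro i hi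
      rw [List.length_take, Nat.min_eq_left]
      rw [List.getD_eq_getElem grid [] hi]
      exact hpre _ (List.getElem_mem hi)
    have hrowget : ∀ i j : Nat, i < grid.length → j < m →
        ((grid.getD i []).take m).getD j 0 = (grid.getD i []).getD j 0 := by
      intro i j hi hj
      have hjl : j < ((grid.getD i []).take m).length := by rw [hrowlen i hi]; exact hj
      rw [List.getD_eq_getElem _ 0 hjl, List.getElem_take,
        List.getD_eq_getElem _ 0 (by have := hjl; rw [List.length_take] at this; omega)]
    -- the three possible final rows equal the target row
    have hrowA : ∀ i : Nat, i < grid.length → (i : Int) = r →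
        ((grid.getD i []).take m).map (fun x => PySem.Int.mod (x + 1) 4)
          = (List.range m).map (pvCell grid r c i) := by
      intro i hi hir
      apply List.ext_getElem
      · rw [List.length_map, hrowlen i hi, List.length_map, List.length_range]
      · intro j h1 h2
        have hjm : j < m := by rwa [List.length_map, List.length_range] at h2
        rw [List.getElem_map, List.getElem_map, List.getElem_range]
        unfold pvCell
        rw [if_pos (Or.inl hir)]
        congr 1
        rw [← hrowget i j hi hjm,
          List.getD_eq_getElem _ 0 (by rw [hrowlen i hi]; exact hjm)]
    have hrowPlain : ∀ i : Nat, i < grid.length → (i : Int) ≠ r → ¬ (0 ≤ c ∧ c < (m : Int)) →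
        (grid.getD i []).take m = (List.range m).map (pvCell grid r c i) := by
      intro i hi hir hc
      apply List.ext_getElem
      · rw [hrowlen i hi, List.length_map, List.length_range]
      · intro j h1 h2
        have hjm : j < m := by rwa [List.length_map, List.length_range] at h2
        rw [List.getElem_map, List.getElem_range]
        unfold pvCell
        rw [if_neg (by
          rintro (h | h)
          · exact hir h
          · exact hc ⟨by omega, by omega⟩)]
        rw [← hrowget i j hi hjm,
          List.getD_eq_getElem _ 0 (by rw [hrowlen i hi]; exact hjm)]
    have hrowCol : ∀ i : Nat, i < grid.length → (i : Int) ≠ r → (0 ≤ c ∧ c < (m : Int)) →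
        ((grid.getD i []).take m).set c.toNat
            (PySem.Int.mod (((grid.getD i []).take m).getD c.toNat 0 + 1) 4)
          = (List.range m).map (pvCell grid r c i) := by
      intro i hi hir hc
      apply List.ext_getElem
      · rw [List.length_set, hrowlen i hi, List.length_map, List.length_range]
      · intro j h1 h2
        have hjm : j < m := by rwa [List.length_map, List.length_range] at h2
        rw [List.getElem_set, List.getElem_map, List.getElem_range]
        unfold pvCell
        by_cases hj : c.toNat = j
        · subst hj
          rw [if_pos rfl, if_pos (Or.inr (by omega))]
          congr 1
          rw [hrowget i c.toNat hi (by omega)]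
        · rw [if_neg hj, if_neg (by
            rintro (h | h)
            · exact hir h
            · exact hj (by omega))]
          rw [List.getElem_take]
          exact (List.getD_eq_getElem _ 0 (by
            have := hrowlen i hi
            rw [List.length_take] at this
            omega)).symm
    -- row i of ng1
    have hng1row : ∀ i : Nat, i < grid.length →
        ng1.getD i [] = if (i : Int) = r then
            ((grid.getD i []).take m).map (fun x => PySem.Int.mod (x + 1) 4)
          else (grid.getD i []).take m := by
      intro i hi
      rw [hng1]
      by_cases hrg : 0 ≤ r ∧ r < (grid.length : Int)
      · rw [if_pos hrg, getD_set_eq_ite]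
        by_cases hir : (i : Int) = r
        · rw [if_pos (by constructor <;> omega), if_pos hir]
          have : r.toNat = i := by omega
          rw [this, hrow0 i hi]
        · rw [if_neg (by rintro ⟨h1, h2⟩; exact hir (by omega)), if_neg hir, hrow0 i hi]
      · rw [if_neg hrg]
        have hir : (i : Int) ≠ r := by omega
        rw [if_neg hir, hrow0 i hi]
    -- assemble
    by_cases hcg : 0 ≤ c ∧ c < (m : Int)
    · rw [if_pos hcg]
      apply List.ext_getElem
      · rw [loop_length, hlen1]
        unfold pvTarget
        rw [List.length_map, List.length_range]
      · intro i h1 h2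
        have hi : i < grid.length := by rwa [loop_length, hlen1] at h1
        rw [← List.getD_eq_getElem _ [] h1, loop_getD]
        unfold pvTarget
        rw [List.getElem_map, List.getElem_range]
        by_cases hir : (i : Int) = r
        · rw [if_neg (by rw [hlen1]; tauto), hng1row i hi, if_pos hir]
          exact hrowA i hi hir
        · rw [if_pos ⟨hi, by rw [hlen1]; exact hi, hir⟩, hng1row i hi, if_neg hir]
          exact hrowCol i hi hir hcg
    · rw [if_neg hcg]
      apply List.ext_getElem
      · rw [hlen1]
        unfold pvTarget
        rw [List.length_map, List.length_range]
      · intro i h1 h2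
        have hi : i < grid.length := by rwa [hlen1] at h1
        rw [← List.getD_eq_getElem _ [] h1, hng1row i hi]
        unfold pvTarget
        rw [List.getElem_map, List.getElem_range]
        by_cases hir : (i : Int) = r
        · rw [if_pos hir]
          exact hrowA i hi hir
        · rw [if_neg hir]
          exact hrowPlain i hi hir hcg

-- ===== VERDICT (by name: the statement is the Claim_ definition above) =====
theorem get_new_map_spec : Claim_equal_get_new_map := by
  intro grid r c _ hpre
  unfold Spec_get_new_map
  rw [A_eq_target, B_eq_target grid r c hpre]
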